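-- pv_equiv track=rewrite | github.com/YuyueZhou711/Underwater-navigation-for-legged-robots | tools/measure_stereo_offset.py | nearest_abs_diffs
-- ===== SOURCE A (Python) =====
-- from bisect import bisect_left
--
-- def nearest_abs_diffs(a, b):
--     if not a or not b:
--         return []
--     b_sorted = sorted(b)
--     diffs = []
--     for t in a:
--         i = bisect_left(b_sorted, t)
--         candidates = []
--         if i < len(b_sorted):
--             candidates.append(abs(t - b_sorted[i]))
--         if i > 0:
--             candidates.append(abs(t - b_sorted[i - 1]))
--         if candidates:
--             diffs.append(min(candidates))
--     return diffs
-- ===== SOURCE B (Python) =====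
-- def nearest_abs_diffs(a, b):
--     if not a or not b:
--         return []
--     return [min(abs(t - x) for x in b) for t in a]
-- ===== Notes on version B (the rewrite author's own statement) =====
-- stated objective: simpler
-- what changed: Drops the sort and bisect_left neighbour search; each output is computed directly as the minimum of abs(t - x) over all x in b by a plain linear scan.
import Mathlib
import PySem

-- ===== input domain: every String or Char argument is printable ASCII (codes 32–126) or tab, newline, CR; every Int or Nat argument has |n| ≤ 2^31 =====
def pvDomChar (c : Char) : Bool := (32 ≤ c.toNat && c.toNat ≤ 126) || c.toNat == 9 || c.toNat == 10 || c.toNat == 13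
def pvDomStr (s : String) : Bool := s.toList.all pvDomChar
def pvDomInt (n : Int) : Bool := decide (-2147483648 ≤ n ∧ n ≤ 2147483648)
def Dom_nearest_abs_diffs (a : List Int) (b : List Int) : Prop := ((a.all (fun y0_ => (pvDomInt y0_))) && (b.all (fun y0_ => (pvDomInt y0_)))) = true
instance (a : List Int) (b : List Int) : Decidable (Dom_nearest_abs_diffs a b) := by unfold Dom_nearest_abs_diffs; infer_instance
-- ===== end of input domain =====

-- B drops the sort and bisect_left neighbour search and takes the minimum of |t - x| over all of b directly (simpler, not faster).


-- ===== PORT A =====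
def nearest_abs_diffs (a : List Int) (b : List Int) : List Int :=
  if a = [] ∨ b = [] then []
  else
    let bSorted := PySem.List.sorted b (fun x => x)
    a.foldl (fun diffs t =>
      let i := PySem.List.bisectLeft bSorted t
      let candidates : List Int :=
        (if i < bSorted.length then [|t - bSorted.getD i 0|] else []) ++
        (if 0 < i then [|t - bSorted.getD (i - 1) 0|] else [])
      match PySem.List.min? candidates (fun y => y) with
      | some m => diffs ++ [m]
      | none => diffs) []

-- ===== PORT B =====
def nearest_abs_diffs_alt (a : List Int) (b : List Int) : List Int :=
  if a = [] ∨ b = [] then []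
  else a.map (fun t => (PySem.List.min? (b.map (fun x => |t - x|)) (fun y => y)).getD 0)

-- ===== PRECONDITION & SPEC =====
def Spec_nearest_abs_diffs (a : List Int) (b : List Int) (out : List Int) : Prop := out = nearest_abs_diffs_alt a b
instance (a : List Int) (b : List Int) (out : List Int) : Decidable (Spec_nearest_abs_diffs a b out) := by unfold Spec_nearest_abs_diffs; infer_instance

-- ===== CLAIM (what is proved, stated in full; the proofs are below) =====
def Claim_equal_nearest_abs_diffs : Prop := ∀ (a : List Int) (b : List Int), Dom_nearest_abs_diffs a b → Spec_nearest_abs_diffs a b (nearest_abs_diffs a b)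

-- ===== LEMMAS AND PROOFS =====

-- per-element equality: A's two-candidate minimum is the minimum of |t - x| over b
theorem step_eq (b : List Int) (hb : b ≠ []) (t : Int) :
    PySem.List.min?
        ((if PySem.List.bisectLeft (PySem.List.sorted b (fun x => x)) t < (PySem.List.sorted b (fun x => x)).length
            then [|t - (PySem.List.sorted b (fun x => x)).getD (PySem.List.bisectLeft (PySem.List.sorted b (fun x => x)) t) 0|] else []) ++
         (if 0 < PySem.List.bisectLeft (PySem.List.sorted b (fun x => x)) t
            then [|t - (PySem.List.sorted b (fun x => x)).getD (PySem.List.bisectLeft (PySem.List.sorted b (fun x => x)) t - 1) 0|] else []))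
        (fun y => y) =
    some ((PySem.List.min? (b.map (fun x => |t - x|)) (fun y => y)).getD 0) := by
  set bs := PySem.List.sorted b (fun x => x) with hbs
  have hperm : bs.Perm b := PySem.List.sorted_perm b (fun x => x) false
  have hpw : bs.Pairwise (fun a b => a ≤ b) := PySem.List.sorted_pairwise b (fun x => x)
  have hbsne : bs ≠ [] := by
    intro h
    rw [h] at hperm
    exact hb hperm.symm.eq_nil
  set i := PySem.List.bisectLeft bs t with hi
  obtain ⟨hile, hlt, hge⟩ := PySem.List.bisectLeft_spec bs t hpw
  have hlen : 0 < bs.length := List.length_pos_iff.mpr hbsne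
  -- the candidate list is nonempty
  set cands : List Int :=
    (if i < bs.length then [|t - bs.getD i 0|] else []) ++
    (if 0 < i then [|t - bs.getD (i - 1) 0|] else []) with hcands
  have hcne : cands ≠ [] := by
    rcases Nat.lt_or_ge i bs.length with h | h
    · simp [hcands, h]
    · have : 0 < i := lt_of_lt_of_le hlen h
      simp [hcands, this]
  obtain ⟨m, hm⟩ : ∃ m, PySem.List.min? cands (fun y => y) = some m := by
    cases h : PySem.List.min? cands (fun y => y) with
    | none => exact absurd ((PySem.List.min?_eq_none_iff _ _).mp h) hcne
    | some m => exact ⟨m, rfl⟩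
  have hmmem : m ∈ cands := PySem.List.min?_mem hm
  have hmlb : ∀ y ∈ cands, m ≤ y := by
    have := PySem.List.min?_isMin hm; simpa using this
  -- m is an element of b.map f
  have hmap : m ∈ b.map (fun x => |t - x|) := by
    have : ∃ j, ∃ h : j < bs.length, m = |t - bs[j]| := by
      rcases List.mem_append.mp hmmem with h | h
      · rcases Nat.lt_or_ge i bs.length with hi' | hi'
        · refine ⟨i, hi', ?_⟩
          rw [if_pos hi', List.mem_singleton, List.getD_eq_getElem _ _ hi'] at h
          exact h
        · simp [Nat.not_lt.mpr hi'] at h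
      · rcases Nat.lt_or_ge 0 i with hi' | hi'
        · have hj : i - 1 < bs.length := by omega
          refine ⟨i - 1, hj, ?_⟩
          rw [if_pos hi', List.mem_singleton, List.getD_eq_getElem _ _ hj] at h
          exact h
        · simp [Nat.le_zero.mp hi'] at h
    obtain ⟨j, hj, hmj⟩ := this
    have : bs[j] ∈ b := hperm.mem_iff.mp (List.getElem_mem hj)
    exact hmj ▸ List.mem_map_of_mem this
  -- m is a lower bound for b.map f
  have hlb : ∀ y ∈ b.map (fun x => |t - x|), m ≤ y := by
    intro y hy
    obtain ⟨x, hx, rfl⟩ := List.mem_map.mp hy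
    have hxbs : x ∈ bs := hperm.mem_iff.mpr hx
    obtain ⟨j, hj, rfl⟩ := List.mem_iff_getElem.mp hxbs
    rcases Nat.lt_or_ge j i with hji | hji
    · -- bs[j] < t; candidate at i-1 applies
      have h0i : 0 < i := by omega
      have hj1 : i - 1 < bs.length := by omega
      have hcand : m ≤ |t - bs.getD (i - 1) 0| := by
        apply hmlb; simp [hcands, h0i]
      have h1 : bs[i-1] < t := hlt (i-1) hj1 (by omega)
      have h2 : bs[j] ≤ bs[i-1] :=
        PySem.List.sorted_id_getElem_mono b (by omega) hj1
      have h3 : bs[j] < t := hlt j hj hji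
      rw [List.getD_eq_getElem _ _ hj1] at hcand
      rw [abs_of_pos (by omega)] at hcand
      rw [abs_of_pos (by omega)]
      omega
    · -- t ≤ bs[j]; candidate at i applies
      have hilen : i < bs.length := by omega
      have hcand : m ≤ |t - bs.getD i 0| := by
        apply hmlb; simp [hcands, hilen]
      have h1 : t ≤ bs[i] := hge i hilen (le_refl _)
      have h2 : bs[i] ≤ bs[j] :=
        PySem.List.sorted_id_getElem_mono b hji hj
      have h3 : t ≤ bs[j] := le_trans h1 h2
      rw [List.getD_eq_getElem _ _ hilen] at hcand
      rw [abs_of_nonpos (by omega)] at hcand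
      rw [abs_of_nonpos (by omega)]
      omega
  -- B's minimum equals m
  obtain ⟨mb, hmb⟩ : ∃ mb, PySem.List.min? (b.map (fun x => |t - x|)) (fun y => y) = some mb := by
    cases h : PySem.List.min? (b.map (fun x => |t - x|)) (fun y => y) with
    | none =>
        have := (PySem.List.min?_eq_none_iff _ _).mp h
        simp [List.map_eq_nil_iff] at this
        exact absurd this hb
    | some mb => exact ⟨mb, rfl⟩
  have hmbmem : mb ∈ b.map (fun x => |t - x|) := PySem.List.min?_mem hmb
  have hmblb : ∀ y ∈ b.map (fun x => |t - x|), mb ≤ y := by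
    have := PySem.List.min?_isMin hmb; simpa using this
  have : m = mb := le_antisymm (hlb mb hmbmem) (hmblb m hmap)
  rw [hm, hmb, this]
  rfl

-- fold-append vs map
theorem foldl_append_map (g : Int → Int) (a : List Int) :
    ∀ acc : List Int, a.foldl (fun d t => d ++ [g t]) acc = acc ++ a.map g := by
  induction a with
  | nil => intro acc; simp
  | cons x xs ih => intro acc; simp [List.foldl_cons, ih]

-- ===== VERDICT (by name: the statement is the Claim_ definition above) =====
theorem nearest_abs_diffs_spec : Claim_equal_nearest_abs_diffs := by
  intro a b _
  unfold Spec_nearest_abs_diffs nearest_abs_diffs nearest_abs_diffs_alt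
  by_cases h : a = [] ∨ b = []
  · simp [h]
  · push Not at h
    obtain ⟨ha, hb⟩ := h
    have hcond : ¬(a = [] ∨ b = []) := by tauto
    rw [if_neg hcond, if_neg hcond]
    have hbody : ∀ (d : List Int) (t : Int),
        (match PySem.List.min?
            ((if PySem.List.bisectLeft (PySem.List.sorted b (fun x => x)) t < (PySem.List.sorted b (fun x => x)).length
                then [|t - (PySem.List.sorted b (fun x => x)).getD (PySem.List.bisectLeft (PySem.List.sorted b (fun x => x)) t) 0|] else []) ++
             (if 0 < PySem.List.bisectLeft (PySem.List.sorted b (fun x => x)) t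
                then [|t - (PySem.List.sorted b (fun x => x)).getD (PySem.List.bisectLeft (PySem.List.sorted b (fun x => x)) t - 1) 0|] else []))
            (fun y => y) with
         | some m => d ++ [m]
         | none => d) =
        d ++ [(PySem.List.min? (b.map (fun x => |t - x|)) (fun y => y)).getD 0] := by
      intro d t
      rw [step_eq b hb t]
    calc List.foldl
          (fun diffs t =>
            match PySem.List.min?
                ((if PySem.List.bisectLeft (PySem.List.sorted b (fun x => x)) t < (PySem.List.sorted b (fun x => x)).length
                    then [|t - (PySem.List.sorted b (fun x => x)).getD (PySem.List.bisectLeft (PySem.List.sorted b (fun x => x)) t) 0|] else []) ++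
                 (if 0 < PySem.List.bisectLeft (PySem.List.sorted b (fun x => x)) t
                    then [|t - (PySem.List.sorted b (fun x => x)).getD (PySem.List.bisectLeft (PySem.List.sorted b (fun x => x)) t - 1) 0|] else []))
                (fun y => y) with
            | some m => diffs ++ [m]
            | none => diffs) [] a
        = a.foldl (fun d t => d ++ [(PySem.List.min? (b.map (fun x => |t - x|)) (fun y => y)).getD 0]) [] := by
          congr 1; funext d t; exact hbody d t
      _ = a.map (fun t => (PySem.List.min? (b.map (fun x => |t - x|)) (fun y => y)).getD 0) := by
          simpa using foldl_append_map (fun t => (PySem.List.min? (b.map (fun x => |t - x|)) (fun y => y)).getD 0) a
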